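-- pv_equiv track=rewrite | github.com/cgw9597/programmers | 프로그래머스/unrated/181854. 배열의 길이에 따라 다른 연산하기/배열의 길이에 따라 다른 연산하기.py | solution
-- ===== SOURCE A (Python) =====
-- def solution(arr, n):
--     for i,j in enumerate(arr):
--         if len(arr)%2==0:
--             if i%2!=0:
--                 arr[i] += n
--         else:
--             if i%2==0:
--                 arr[i] += n
--     answer = arr
--     return answer
-- ===== SOURCE B (Python) =====
-- def solution(arr, n):
--     start = 1 if len(arr) % 2 == 0 else 0
--     for i in range(start, len(arr), 2):
--         arr[i] += n
--     return arr
-- ===== Notes on version B (the rewrite author's own statement) =====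
-- stated objective: simpler
-- what changed: Instead of scanning every element and branching on index parity inside the loop, B computes the starting offset from the length parity once and walks only the target indices with a stride-2 range, mutating arr in place like A.
import Mathlib
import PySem

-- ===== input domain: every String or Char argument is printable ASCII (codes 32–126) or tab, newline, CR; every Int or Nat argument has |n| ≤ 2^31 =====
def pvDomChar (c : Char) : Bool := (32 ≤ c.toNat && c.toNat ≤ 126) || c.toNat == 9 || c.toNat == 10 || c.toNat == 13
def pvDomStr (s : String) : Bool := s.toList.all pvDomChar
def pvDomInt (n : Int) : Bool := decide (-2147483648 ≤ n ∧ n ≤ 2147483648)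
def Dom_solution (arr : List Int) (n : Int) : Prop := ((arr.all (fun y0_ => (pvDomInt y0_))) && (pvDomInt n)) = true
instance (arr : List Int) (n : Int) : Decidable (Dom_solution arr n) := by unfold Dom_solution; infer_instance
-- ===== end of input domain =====

-- B replaces A's scan-every-index-and-branch pass by a stride-2 walk over only the
-- target indices (simpler). Both A and B mutate arr in place in Python and return it;
-- the theorems here are about the return value (the in-place effect is identical).

-- ===== PORT A =====
-- for i,j in enumerate(arr): branch on len(arr)%2, then on i%2, arr[i] += n.
-- len(arr) is read inside the loop in Python, but pySetD preserves length, so the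
-- constant arr.length here is exact.  j is bound but unused, as in the source.
def solution (arr : List Int) (n : Int) : List Int :=
  let answer :=
    (PySem.List.enumerate arr 0).foldl
      (fun a (p : Int × Int) =>
        if ((arr.length : Int) % 2 == 0) then
          (if (p.1 % 2 != 0) then PySem.List.pySetD a p.1 (PySem.List.pyGetD a p.1 0 + n) else a)
        else
          (if (p.1 % 2 == 0) then PySem.List.pySetD a p.1 (PySem.List.pyGetD a p.1 0 + n) else a))
      arr
  answer

-- ===== PORT B =====
-- start = 1 if len(arr)%2==0 else 0; for i in range(start, len(arr), 2): arr[i] += n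
def solution_alt (arr : List Int) (n : Int) : List Int :=
  let start : Int := if ((arr.length : Int) % 2 == 0) then 1 else 0
  (PySem.List.pyRange start (arr.length : Int) 2).foldl
    (fun a i => PySem.List.pySetD a i (PySem.List.pyGetD a i 0 + n)) arr

-- ===== PRECONDITION & SPEC =====
def Spec_solution (arr : List Int) (n : Int) (out : List Int) : Prop := out = solution_alt arr n
instance (arr : List Int) (n : Int) (out : List Int) : Decidable (Spec_solution arr n out) := by unfold Spec_solution; infer_instance

-- ===== CLAIM (what is proved, stated in full; the proofs are below) =====
def Claim_equal_solution : Prop := ∀ (arr : List Int) (n : Int), Dom_solution arr n → Spec_solution arr n (solution arr n)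

-- ===== LEMMAS AND PROOFS =====

-- the add-n-at-index step preserves length
lemma pv_foldl_set_length (n : Int) (idxs : List Int) : ∀ (a : List Int),
    (idxs.foldl (fun a i => PySem.List.pySetD a i (PySem.List.pyGetD a i 0 + n)) a).length
      = a.length := by
  induction idxs with
  | nil => intro a; rfl
  | cons i is ih =>
      intro a
      simp only [List.foldl_cons, ih, PySem.List.length_pySetD]

-- folding the add-n-at-index step over a nodup in-range index list adds n exactly at
-- the listed indices
lemma pv_foldl_set_getD (n : Int) : ∀ (idxs : List Int) (a : List Int) (k : Nat),
    idxs.Nodup → (∀ i ∈ idxs, 0 ≤ i ∧ i < (a.length : Int)) → k < a.length →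
    PySem.List.pyGetD (idxs.foldl (fun a i => PySem.List.pySetD a i (PySem.List.pyGetD a i 0 + n)) a) (k : Int) 0
      = if (k : Int) ∈ idxs then PySem.List.pyGetD a (k : Int) 0 + n else PySem.List.pyGetD a (k : Int) 0 := by
  intro idxs
  induction idxs with
  | nil => intro a k _ _ _; simp
  | cons i is ih =>
      intro a k hnd hbd hk
      obtain ⟨hi0, hilen⟩ := hbd i (List.mem_cons_self ..)
      have him : i = ((i.toNat : Nat) : Int) := by omega
      have hiL : i.toNat < a.length := by omega
      simp only [List.foldl_cons]
      have hlen' : (PySem.List.pySetD a i (PySem.List.pyGetD a i 0 + n)).length = a.length :=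
        PySem.List.length_pySetD ..
      have hstep : ∀ (m : Nat), PySem.List.pyGetD (PySem.List.pySetD a i (PySem.List.pyGetD a i 0 + n)) (m : Int) 0
          = if m = i.toNat then PySem.List.pyGetD a i 0 + n else PySem.List.pyGetD a (m : Int) 0 := by
        intro m
        conv_lhs => rw [him]
        rw [PySem.List.pyGetD_pySetD_natCast a i.toNat m _ 0 hiL, ← him]
      rw [ih (PySem.List.pySetD a i (PySem.List.pyGetD a i 0 + n)) k hnd.of_cons
          (by intro j hj; rw [hlen']; exact hbd j (List.mem_cons_of_mem _ hj))
          (by omega), hstep k]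
      by_cases hki : k = i.toNat
      · have hnotin : ((k : Nat) : Int) ∉ is := by
          intro h
          exact (List.nodup_cons.mp hnd).1 (by rwa [hki, ← him] at h)
        rw [if_neg hnotin, if_pos hki,
            if_pos (List.mem_cons.mpr (Or.inl (by omega)))]
        rw [hki, ← him]
      · have hne : ((k : Nat) : Int) ≠ i := by omega
        simp only [if_neg hki, List.mem_cons, hne, false_or]

-- a fold whose step uses only the first component folds over the first projections
lemma pv_foldl_fst {A B C : Type} (f : A → B → A) (l : List (B × C)) (init : A) :
    l.foldl (fun a p => f a p.1) init = (l.map (fun p => p.1)).foldl f init := by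
  induction l generalizing init with
  | nil => rfl
  | cons x xs ih => simp only [List.foldl_cons, List.map_cons, ih]

-- A's result is the unconditional fold over the indices passing its parity test
lemma pv_solution_eq_filter (arr : List Int) (n : Int) :
    solution arr n =
      ((PySem.List.pyRange 0 (arr.length : Int) 1).filter
          (fun i => if ((arr.length : Int) % 2 == 0) then (i % 2 != 0) else (i % 2 == 0))).foldl
        (fun a i => PySem.List.pySetD a i (PySem.List.pyGetD a i 0 + n)) arr := by
  rw [List.foldl_filter]
  show (PySem.List.enumerate arr 0).foldl _ arr = _
  have hfun : (fun (a : List Int) (p : Int × Int) =>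
        if ((arr.length : Int) % 2 == 0) then
          (if (p.1 % 2 != 0) then PySem.List.pySetD a p.1 (PySem.List.pyGetD a p.1 0 + n) else a)
        else
          (if (p.1 % 2 == 0) then PySem.List.pySetD a p.1 (PySem.List.pyGetD a p.1 0 + n) else a))
      = (fun (a : List Int) (p : Int × Int) =>
          (fun (x : List Int) (y : Int) =>
            if (if ((arr.length : Int) % 2 == 0) then (y % 2 != 0) else (y % 2 == 0)) = true then
              PySem.List.pySetD x y (PySem.List.pyGetD x y 0 + n)
            else x) a p.1) := by
    funext a p
    by_cases h : (((arr.length : Int) % 2 == 0) : Bool) = true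
    · simp only [h, if_true]
    · simp only [eq_false_of_ne_true h, if_false, Bool.false_eq_true]
  rw [hfun, pv_foldl_fst
      (fun (x : List Int) (y : Int) =>
        if (if ((arr.length : Int) % 2 == 0) then (y % 2 != 0) else (y % 2 == 0)) = true then
          PySem.List.pySetD x y (PySem.List.pyGetD x y 0 + n)
        else x)
      (PySem.List.enumerate arr 0) arr, PySem.List.map_fst_enumerate]
  simp only [zero_add]

-- membership in A's filtered index list agrees with membership in B's strided range
lemma pv_mem_iff (arr : List Int) (k : Nat) :
    ((k : Int) ∈ (PySem.List.pyRange 0 (arr.length : Int) 1).filter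
        (fun i => if ((arr.length : Int) % 2 == 0) then (i % 2 != 0) else (i % 2 == 0)))
      ↔ ((k : Int) ∈ PySem.List.pyRange
            (if ((arr.length : Int) % 2 == 0) then (1 : Int) else 0) (arr.length : Int) 2) := by
  rw [List.mem_filter, PySem.List.mem_pyRange_one,
      PySem.List.mem_pyRange_iff_of_pos (by norm_num)]
  by_cases h : (((arr.length : Int) % 2 == 0) : Bool) = true
  · rw [if_pos h, if_pos h, bne_iff_ne]
    constructor
    · rintro ⟨⟨h0, hlt⟩, hpar⟩
      refine ⟨by omega, hlt, by omega⟩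
    · rintro ⟨h1, hlt, hdvd⟩
      exact ⟨⟨by omega, hlt⟩, by omega⟩
  · rw [if_neg h, if_neg h, beq_iff_eq]
    constructor
    · rintro ⟨⟨h0, hlt⟩, hpar⟩
      refine ⟨by omega, hlt, by omega⟩
    · rintro ⟨h1, hlt, hdvd⟩
      exact ⟨⟨by omega, hlt⟩, by omega⟩

lemma pv_nodup_pyRange_two (a b : Int) : (PySem.List.pyRange a b 2).Nodup := by
  rw [PySem.List.pyRange_of_pos a b (by norm_num)]
  exact List.nodup_range.map (fun x y h => by omega)

lemma pv_solution_eq_alt (arr : List Int) (n : Int) : solution arr n = solution_alt arr n := by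
  rw [pv_solution_eq_filter]
  show _ = (PySem.List.pyRange (if ((arr.length : Int) % 2 == 0) then (1:Int) else 0)
      (arr.length : Int) 2).foldl (fun a i => PySem.List.pySetD a i (PySem.List.pyGetD a i 0 + n)) arr
  have hlenA := pv_foldl_set_length n
    ((PySem.List.pyRange 0 (arr.length : Int) 1).filter
      (fun i => if ((arr.length : Int) % 2 == 0) then (i % 2 != 0) else (i % 2 == 0))) arr
  have hlenB := pv_foldl_set_length n
    (PySem.List.pyRange (if ((arr.length : Int) % 2 == 0) then (1:Int) else 0) (arr.length : Int) 2) arr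
  apply List.ext_getElem (by rw [hlenA, hlenB])
  intro k h1 h2
  have hk : k < arr.length := by omega
  have hA := pv_foldl_set_getD n
    ((PySem.List.pyRange 0 (arr.length : Int) 1).filter
      (fun i => if ((arr.length : Int) % 2 == 0) then (i % 2 != 0) else (i % 2 == 0))) arr k
    ((PySem.List.nodup_pyRange_one 0 (arr.length : Int)).filter _)
    (by intro j hj
        have := (List.mem_filter.mp hj).1
        rw [PySem.List.mem_pyRange_one] at this
        omega)
    hk
  have hB := pv_foldl_set_getD n
    (PySem.List.pyRange (if ((arr.length : Int) % 2 == 0) then (1:Int) else 0) (arr.length : Int) 2) arr k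
    (pv_nodup_pyRange_two _ _)
    (by intro j hj
        rw [PySem.List.mem_pyRange_iff_of_pos (by norm_num)] at hj
        rcases hj with ⟨hja, hjb, -⟩
        constructor
        · split at hja <;> omega
        · exact hjb)
    hk
  have hgA : (((PySem.List.pyRange 0 (arr.length : Int) 1).filter
        (fun i => if ((arr.length : Int) % 2 == 0) then (i % 2 != 0) else (i % 2 == 0))).foldl
      (fun a i => PySem.List.pySetD a i (PySem.List.pyGetD a i 0 + n)) arr)[k]'h1
      = PySem.List.pyGetD (((PySem.List.pyRange 0 (arr.length : Int) 1).filter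
        (fun i => if ((arr.length : Int) % 2 == 0) then (i % 2 != 0) else (i % 2 == 0))).foldl
      (fun a i => PySem.List.pySetD a i (PySem.List.pyGetD a i 0 + n)) arr) (k : Int) 0 := by
    rw [PySem.List.pyGetD_eq_getElem _ 0 (by omega) (by rw [hlenA]; omega)]
    simp
  have hgB : ((PySem.List.pyRange (if ((arr.length : Int) % 2 == 0) then (1:Int) else 0)
        (arr.length : Int) 2).foldl
      (fun a i => PySem.List.pySetD a i (PySem.List.pyGetD a i 0 + n)) arr)[k]'h2
      = PySem.List.pyGetD ((PySem.List.pyRange (if ((arr.length : Int) % 2 == 0) then (1:Int) else 0)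
        (arr.length : Int) 2).foldl
      (fun a i => PySem.List.pySetD a i (PySem.List.pyGetD a i 0 + n)) arr) (k : Int) 0 := by
    rw [PySem.List.pyGetD_eq_getElem _ 0 (by omega) (by rw [hlenB]; omega)]
    simp
  rw [hgA, hgB, hA, hB]
  exact if_congr (pv_mem_iff arr k) rfl rfl

-- ===== VERDICT (by name: the statement is the Claim_ definition above) =====
theorem solution_spec : Claim_equal_solution := by
  intro arr n _
  show solution arr n = solution_alt arr n
  exact pv_solution_eq_alt arr n
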